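-- pv_equiv track=rewrite | github.com/RyanMSutherland/ME_531_Project | chelse_kalman_filter_PID_control.py | direction_from_flex
-- ===== SOURCE A (Python) =====
-- noise_threshold = 2
--
-- def direction_from_flex(active):
--     # Map combinations to directions
--     combinations = {
--         (1, 0, 0, 0): 'South',
--         (0, 1, 0, 0): 'West',
--         (0, 0, 1, 0): 'North',
--         (0, 0, 0, 1): 'East',
--         (1, 1, 0, 0): 'Southwest',
--         (0, 1, 1, 0): 'Northwest',
--         (0, 0, 1, 1): 'Northeast',
--         (1, 0, 0, 1): 'Southeast',
--         (1, 1, 1, 0): 'West',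
--         (1, 1, 0, 1): 'South',
--         (0, 1, 1, 1): 'North',
--         (1, 0, 1, 1): 'East',
--         (1, 1, 1, 1): 'STOP'
--     }
--     key = tuple(int(a > noise_threshold) for a in active)
--     return combinations.get(key, 'Unknown')
-- ===== SOURCE B (Python) =====
-- noise_threshold = 2
--
-- def direction_from_flex(active):
--     flags = [1 if a > noise_threshold else 0 for a in active]
--     if len(flags) != 4:
--         return 'Unknown'
--     s, w, n, e = flags
--     x, y = e - w, n - s
--     if x > 0:
--         return 'Northeast' if y > 0 else 'Southeast' if y < 0 else 'East'
--     if x < 0: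
--         return 'Northwest' if y > 0 else 'Southwest' if y < 0 else 'West'
--     if y > 0:
--         return 'North'
--     if y < 0:
--         return 'South'
--     return 'STOP' if s + w + n + e == 4 else 'Unknown'
-- ===== Notes on version B (the rewrite author's own statement) =====
-- stated objective: simpler
-- what changed: Replaces A's 13-entry tuple-to-name dictionary lookup by a closed form: the four thresholded flags (south, west, north, east) become net axes x = e - w and y = n - s, and the direction is read off the sign pair, with the ambiguous origin resolved to STOP only when all four flags are set. (constant-factor: no dict is built and no tuple key is hashed per call)
import Mathlib
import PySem

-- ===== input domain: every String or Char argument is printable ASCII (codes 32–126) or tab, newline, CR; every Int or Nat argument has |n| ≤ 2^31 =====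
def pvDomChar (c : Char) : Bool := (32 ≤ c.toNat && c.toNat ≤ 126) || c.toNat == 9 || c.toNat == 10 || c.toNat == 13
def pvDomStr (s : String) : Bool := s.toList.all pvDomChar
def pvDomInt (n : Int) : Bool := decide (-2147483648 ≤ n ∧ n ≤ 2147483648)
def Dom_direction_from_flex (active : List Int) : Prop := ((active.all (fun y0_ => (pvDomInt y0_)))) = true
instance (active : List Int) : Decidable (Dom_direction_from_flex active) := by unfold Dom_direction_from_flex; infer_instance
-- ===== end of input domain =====

-- B replaces A's 13-entry pattern dictionary by a net-coordinate closed form (simpler); behaviour identical.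

-- ===== PORT A =====
-- A: build the combination dict, threshold each reading into a 0/1 key, look the key up with default 'Unknown'.
def pvCombinations : PySem.Dict (List Int) String := PySem.Dict.ofList [
    ([1, 0, 0, 0], "South"),
    ([0, 1, 0, 0], "West"),
    ([0, 0, 1, 0], "North"),
    ([0, 0, 0, 1], "East"),
    ([1, 1, 0, 0], "Southwest"),
    ([0, 1, 1, 0], "Northwest"),
    ([0, 0, 1, 1], "Northeast"),
    ([1, 0, 0, 1], "Southeast"),
    ([1, 1, 1, 0], "West"),
    ([1, 1, 0, 1], "South"),
    ([0, 1, 1, 1], "North"),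
    ([1, 0, 1, 1], "East"),
    ([1, 1, 1, 1], "STOP")]

def direction_from_flex (active : List Int) : String :=
  let combinations := pvCombinations
  let key : List Int := active.map (fun a => if a > 2 then 1 else 0)
  combinations.getD key "Unknown"

-- ===== PORT B =====
-- B: threshold, then combine the four flags (south, west, north, east) into net axes x = e - w, y = n - s
-- and read the direction off the sign pair; ambiguous origin is STOP iff all four flags are set.
def direction_from_flex_alt (active : List Int) : String :=
  let flags : List Int := active.map (fun a => if a > 2 then 1 else 0)
  match flags with
  | [s, w, n, e] =>
    let x := e - w
    let y := n - s
    if x > 0 then (if y > 0 then "Northeast" else if y < 0 then "Southeast" else "East")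
    else if x < 0 then (if y > 0 then "Northwest" else if y < 0 then "Southwest" else "West")
    else if y > 0 then "North"
    else if y < 0 then "South"
    else if s + w + n + e == 4 then "STOP" else "Unknown"
  | _ => "Unknown"

-- ===== PRECONDITION & SPEC =====
def Spec_direction_from_flex (active : List Int) (out : String) : Prop := out = direction_from_flex_alt active
instance (active : List Int) (out : String) : Decidable (Spec_direction_from_flex active out) := by unfold Spec_direction_from_flex; infer_instance

-- ===== CLAIM (what is proved, stated in full; the proofs are below) =====
def Claim_equal_direction_from_flex : Prop := ∀ (active : List Int), Dom_direction_from_flex active → Spec_direction_from_flex active (direction_from_flex active)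

-- ===== LEMMAS AND PROOFS =====

-- A's lookup defaults to "Unknown" whenever the key's length is not 4 (every dict key has length 4).
lemma lookup_unknown (key : List Int) (h : key.length ≠ 4) :
    pvCombinations.getD key "Unknown" = "Unknown" := by
  rw [show pvCombinations = PySem.Dict.mk [([1, 0, 0, 0], "South"), ([0, 1, 0, 0], "West"), ([0, 0, 1, 0], "North"), ([0, 0, 0, 1], "East"),
      ([1, 1, 0, 0], "Southwest"), ([0, 1, 1, 0], "Northwest"), ([0, 0, 1, 1], "Northeast"),
      ([1, 0, 0, 1], "Southeast"), ([1, 1, 1, 0], "West"), ([1, 1, 0, 1], "South"), ([0, 1, 1, 1], "North"),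
      ([1, 0, 1, 1], "East"), ([1, 1, 1, 1], "STOP")] from by rfl]
  have hb : ∀ (l : List Int), l.length = 4 → (l == key) = false := by
    intro l hl
    rw [beq_eq_false_iff_ne]
    rintro rfl
    exact h hl
  simp only [PySem.Dict.getD, PySem.Dict.get?,
    List.find?_cons, List.find?_nil,
    hb [1, 0, 0, 0] rfl, hb [0, 1, 0, 0] rfl, hb [0, 0, 1, 0] rfl, hb [0, 0, 0, 1] rfl,
    hb [1, 1, 0, 0] rfl, hb [0, 1, 1, 0] rfl, hb [0, 0, 1, 1] rfl, hb [1, 0, 0, 1] rfl,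
    hb [1, 1, 1, 0] rfl, hb [1, 1, 0, 1] rfl, hb [0, 1, 1, 1] rfl, hb [1, 0, 1, 1] rfl,
    hb [1, 1, 1, 1] rfl, Option.map_none, Option.getD_none]

lemma len_ne4 (active : List Int) (h : active.length ≠ 4) :
    direction_from_flex active = direction_from_flex_alt active := by
  have hk : (active.map (fun a : Int => if a > 2 then (1 : Int) else 0)).length ≠ 4 := by
    simpa using h
  unfold direction_from_flex direction_from_flex_alt
  rw [lookup_unknown _ hk]
  rcases active with _ | ⟨a, _ | ⟨b, _ | ⟨c, _ | ⟨d, _ | ⟨e, rest⟩⟩⟩⟩⟩ <;> simp_all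

-- ===== VERDICT (by name: the statement is the Claim_ definition above) =====
theorem direction_from_flex_spec : Claim_equal_direction_from_flex := by
  intro active _
  show direction_from_flex active = direction_from_flex_alt active
  rcases active with _ | ⟨a, _ | ⟨b, _ | ⟨c, _ | ⟨d, _ | ⟨e, rest⟩⟩⟩⟩⟩
  · exact len_ne4 _ (by simp)
  · exact len_ne4 _ (by simp)
  · exact len_ne4 _ (by simp)
  · exact len_ne4 _ (by simp)
  · by_cases h1 : a > 2 <;> by_cases h2 : b > 2 <;> by_cases h3 : c > 2 <;> by_cases h4 : d > 2
    all_goals simp only [direction_from_flex, direction_from_flex_alt, h1, h2, h3, h4,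
      List.map_cons, List.map_nil, if_pos, if_neg, not_false_eq_true]
    all_goals decide
  · exact len_ne4 _ (by simp)
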